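-- pv_equiv track=rewrite | github.com/uai-art-image-processing/covid19_color_emotion_analysis | composicion/03_Analisis_Esquema_Color/02_New_Yorker/harmonies.py | rectangular
-- ===== SOURCE A (Python) =====
-- def rectangular(wheelColors):
--     for curr in range(6):
--         for width in range(1,3):
--             left = (curr+width) % 12
--             right = (curr+6+width) % 12
--             opp = (curr+6) % 12
--             if wheelColors[curr]==1 and wheelColors[left]==1 and wheelColors[right]==1 and wheelColors[opp]==1:
--                 return True
--     return False
-- ===== SOURCE B (Python) =====
-- def rectangular(wheelColors):
--     # Collect the active diameters (residues 0..5 whose two endpoints are both 1),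
--     # then decide by counting: any 3 distinct residues mod 6 contain a pair at
--     # circular distance 1 or 2 (pigeonhole), so only the 2-diameter case needs an
--     # explicit test, and it fails exactly when the two diameters are perpendicular
--     # neighbours' complement, i.e. 3 apart.
--     diams = [i for i in range(6) if wheelColors[i] == 1 and wheelColors[i + 6] == 1]
--     return len(diams) >= 3 or (len(diams) == 2 and diams[1] - diams[0] != 3)
-- ===== Notes on version B (the rewrite author's own statement) =====
-- stated objective: alternative
-- what changed: B replaces A's search over (start,width) position quadruples by collecting the active diameters and deciding arithmetically by counting: >=3 active diameters always work (pigeonhole mod 6), and exactly 2 work unless they are 3 apart.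
-- outside the precondition, e.g. on rectangular([1, 0, 0, 0, 0, 0]): A returns False, B raises IndexError
import Mathlib
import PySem

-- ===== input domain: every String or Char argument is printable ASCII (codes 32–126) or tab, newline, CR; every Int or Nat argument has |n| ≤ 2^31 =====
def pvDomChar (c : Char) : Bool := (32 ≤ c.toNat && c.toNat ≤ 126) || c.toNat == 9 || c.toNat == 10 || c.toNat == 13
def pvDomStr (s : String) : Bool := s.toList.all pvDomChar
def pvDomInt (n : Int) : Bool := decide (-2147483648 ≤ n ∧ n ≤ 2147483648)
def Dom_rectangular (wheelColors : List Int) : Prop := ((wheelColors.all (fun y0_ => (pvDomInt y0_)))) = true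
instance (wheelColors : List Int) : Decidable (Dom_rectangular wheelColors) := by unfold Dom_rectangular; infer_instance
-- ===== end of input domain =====

-- B collects the active diameters and decides by counting (>=3 always works, 2 work unless 3 apart) instead of A's search over (start,width) quadruples; objective: alternative decomposition, same cost.

-- ===== PORT A =====
-- indexing via pyGetD is exact here: under Pre_ every index actually read (0..11) is in range
def rectangular (wheelColors : List Int) : Bool :=
  (PySem.List.pyRange 0 6 1).any (fun curr =>
    (PySem.List.pyRange 1 3 1).any (fun width =>
      let left := PySem.Int.mod (curr + width) 12
      let right := PySem.Int.mod (curr + 6 + width) 12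
      let opp := PySem.Int.mod (curr + 6) 12
      (PySem.List.pyGetD wheelColors curr 0 == 1) &&
      (PySem.List.pyGetD wheelColors left 0 == 1) &&
      (PySem.List.pyGetD wheelColors right 0 == 1) &&
      (PySem.List.pyGetD wheelColors opp 0 == 1)))

-- ===== PORT B =====
-- pyGetD is exact for the same reason (short-circuit: wheelColors[i+6] is only read after wheelColors[i]==1)
def rectangular_alt (wheelColors : List Int) : Bool :=
  let diams := (PySem.List.pyRange 0 6 1).filter (fun i =>
    (PySem.List.pyGetD wheelColors i 0 == 1) &&
    (PySem.List.pyGetD wheelColors (i + 6) 0 == 1))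
  decide (3 ≤ diams.length) ||
    (decide (diams.length = 2) &&
      (PySem.List.pyGetD diams 1 0 - PySem.List.pyGetD diams 0 0 != 3))

-- ===== PRECONDITION & SPEC =====
-- Pre_ admits full 12-entry wheels and shorter lists (length ≥ 6) with no 1 among the first
-- six entries (both programs trivially return False there); it excludes other short lists, on
-- which A may return False via short-circuit before reaching a missing index while B's
-- diameter pass raises IndexError at position i+6.
def Pre_rectangular (wheelColors : List Int) : Prop :=
  12 ≤ wheelColors.length ∨
  (6 ≤ wheelColors.length ∧ ((wheelColors.take 6).all (fun x => x ≠ 1)) = true)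
instance (wheelColors : List Int) : Decidable (Pre_rectangular wheelColors) := by unfold Pre_rectangular; infer_instance
def pvWitness_rectangular : List Int := [1, 0, 1, 0, 0, 0, 1, 0, 1, 0, 0, 0]

def Spec_rectangular (wheelColors : List Int) (out : Bool) : Prop := out = rectangular_alt wheelColors
instance (wheelColors : List Int) (out : Bool) : Decidable (Spec_rectangular wheelColors out) := by unfold Spec_rectangular; infer_instance

-- ===== CLAIM (what is proved, stated in full; the proofs are below) =====
def Claim_equal_rectangular : Prop := ∀ (wheelColors : List Int), Dom_rectangular wheelColors → Pre_rectangular wheelColors → Spec_rectangular wheelColors (rectangular wheelColors)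

-- ===== LEMMAS AND PROOFS =====

-- ===== VERDICT (by name: the statement is the Claim_ definition above) =====
theorem rectangular_spec : Claim_equal_rectangular := by
  intro wheelColors _ _
  unfold Spec_rectangular
  simp only [rectangular, rectangular_alt,
    show (PySem.List.pyRange 0 6 1 : List Int) = [0,1,2,3,4,5] from by decide,
    show (PySem.List.pyRange 1 3 1 : List Int) = [1,2] from by decide,
    List.any_cons, List.any_nil, List.filter]
  norm_num
  generalize (PySem.List.pyGetD wheelColors (0:Int) 0 == 1) = b0
  generalize (PySem.List.pyGetD wheelColors (1:Int) 0 == 1) = b1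
  generalize (PySem.List.pyGetD wheelColors (2:Int) 0 == 1) = b2
  generalize (PySem.List.pyGetD wheelColors (3:Int) 0 == 1) = b3
  generalize (PySem.List.pyGetD wheelColors (4:Int) 0 == 1) = b4
  generalize (PySem.List.pyGetD wheelColors (5:Int) 0 == 1) = b5
  generalize (PySem.List.pyGetD wheelColors (6:Int) 0 == 1) = b6
  generalize (PySem.List.pyGetD wheelColors (7:Int) 0 == 1) = b7
  generalize (PySem.List.pyGetD wheelColors (8:Int) 0 == 1) = b8
  generalize (PySem.List.pyGetD wheelColors (9:Int) 0 == 1) = b9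
  generalize (PySem.List.pyGetD wheelColors (10:Int) 0 == 1) = b10
  generalize (PySem.List.pyGetD wheelColors (11:Int) 0 == 1) = b11
  revert b0 b1 b2 b3 b4 b5 b6 b7 b8 b9 b10 b11
  decide
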